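-- pv_equiv track=rewrite | github.com/Flanagan-Lab-Neutron-Detector/data-analysis | sector-voltage.py | select_voltage
-- ===== SOURCE A (Python) =====
-- def select_voltage(word_values, voltage_list):
-- 	"""
-- 	Selects a voltage from a list of voltages, for an entire word
-- 	"""
-- 	voltages = [voltage_list[-1]] * 16
-- 	for bit in range(16):
-- 		# scan from low to high, we choose the first voltage at which the bit is set
-- 		for i,w in enumerate(word_values):
-- 			if ((w >> bit) & 1) == 1:
-- 				voltages[bit] = voltage_list[i]
-- 				break
-- 	return voltages
--
-- voltages = {}
-- ===== SOURCE B (Python) =====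
-- def select_voltage(word_values, voltage_list):
--     voltages = [voltage_list[-1]] * 16
--     unresolved = set(range(16))
--     for i, w in enumerate(word_values):
--         if not unresolved:
--             break
--         for bit in sorted(unresolved):
--             if (w >> bit) & 1:
--                 voltages[bit] = voltage_list[i]
--                 unresolved.remove(bit)
--     return voltages
-- ===== Notes on version B (the rewrite author's own statement) =====
-- stated objective: alternative
-- what changed: Replaces A's 16 separate full scans of word_values (one per bit) by a single pass over word_values that maintains a shrinking set of still-unresolved bits and breaks early once all 16 bits are resolved.
-- outside the precondition, e.g. on select_voltage([1], []): A raises IndexError, B raises IndexError; on select_voltage([0, 3], [5]): A raises IndexError, B raises IndexError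
import Mathlib
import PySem

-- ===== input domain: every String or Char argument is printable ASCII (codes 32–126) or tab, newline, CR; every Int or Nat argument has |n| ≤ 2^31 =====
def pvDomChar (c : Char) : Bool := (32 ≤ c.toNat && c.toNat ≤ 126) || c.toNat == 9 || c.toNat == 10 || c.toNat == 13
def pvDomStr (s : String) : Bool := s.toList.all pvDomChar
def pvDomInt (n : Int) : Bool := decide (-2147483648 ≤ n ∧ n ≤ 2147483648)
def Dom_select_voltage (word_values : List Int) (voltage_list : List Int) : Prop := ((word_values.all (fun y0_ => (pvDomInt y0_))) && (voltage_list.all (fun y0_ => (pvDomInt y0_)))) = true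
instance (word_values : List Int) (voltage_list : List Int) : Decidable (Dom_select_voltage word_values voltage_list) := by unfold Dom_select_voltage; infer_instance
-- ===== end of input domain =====

-- B replaces A's 16 full scans of word_values (one per bit) by a single pass
-- maintaining a shrinking set of unresolved bits, with early exit; same values (alternative, not measured faster).

-- shared helper: Python's ((w >> bit) & 1) == 1 (arithmetic shift = floor division; exact for all Int)
def pvBitSet (w : Int) (bit : Nat) : Bool := PySem.Int.mod (PySem.Int.floordiv w ((2 : Int) ^ bit)) 2 == 1

-- ===== PORT A =====
-- inner 'for i,w in enumerate(word_values): … break' loop of A: first index whose bit is set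
def pvFirstSetA (bit : Nat) : List Int → Nat → Option Nat
  | [], _ => none
  | w :: rest, i => if pvBitSet w bit then some i else pvFirstSetA bit rest (i + 1)

-- Python raises IndexError where pyGet? is none; those inputs are excluded by Pre_, so getD 0 is never reached there
def select_voltage (word_values : List Int) (voltage_list : List Int) : List Int :=
  let init := List.replicate 16 ((PySem.List.pyGet? voltage_list (-1)).getD 0)
  (List.range 16).foldl
    (fun voltages bit =>
      match pvFirstSetA bit word_values 0 with
      | some i => voltages.set bit ((PySem.List.pyGet? voltage_list (i : Int)).getD 0)
      | none => voltages)
    init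

-- ===== PORT B =====
-- body of B's inner 'for bit in sorted(unresolved)' loop (unresolved is kept in sorted order)
def pvStepB (w : Int) (x : Int) (p : List Int × List Nat) (bit : Nat) : List Int × List Nat :=
  if pvBitSet w bit then (p.1.set bit x, p.2.erase bit) else p

-- B's single pass over enumerate(word_values) with early break once unresolved is empty
def pvLoopB (voltage_list : List Int) : List Int → Nat → List Int → List Nat → List Int
  | [], _, voltages, _ => voltages
  | w :: rest, i, voltages, unresolved =>
    if unresolved.isEmpty then voltages
    else
      let st := unresolved.foldl (pvStepB w ((PySem.List.pyGet? voltage_list (i : Int)).getD 0))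
                  (voltages, unresolved)
      pvLoopB voltage_list rest (i + 1) st.1 st.2

def select_voltage_alt (word_values : List Int) (voltage_list : List Int) : List Int :=
  pvLoopB voltage_list word_values 0
    (List.replicate 16 ((PySem.List.pyGet? voltage_list (-1)).getD 0))
    (List.range 16)

-- ===== PRECONDITION & SPEC =====
-- Pre_ excludes exactly the inputs on which Python A raises IndexError: empty voltage_list
-- (voltage_list[-1]), or some bit whose first set-bit index in word_values falls beyond voltage_list.
def Pre_select_voltage (word_values : List Int) (voltage_list : List Int) : Prop :=
  voltage_list ≠ [] ∧
  ∀ bit ∈ List.range 16,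
    (word_values.findIdx? (fun w => pvBitSet w bit)).getD 0 < voltage_list.length

instance (word_values : List Int) (voltage_list : List Int) : Decidable (Pre_select_voltage word_values voltage_list) := by
  unfold Pre_select_voltage; infer_instance

def pvWitness_select_voltage : List Int × List Int := ([3, 4], [10, 20])

def Spec_select_voltage (word_values : List Int) (voltage_list : List Int) (out : List Int) : Prop := out = select_voltage_alt word_values voltage_list
instance (word_values : List Int) (voltage_list : List Int) (out : List Int) : Decidable (Spec_select_voltage word_values voltage_list out) := by unfold Spec_select_voltage; infer_instance

-- ===== CLAIM (what is proved, stated in full; the proofs are below) =====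
def Claim_equal_select_voltage : Prop := ∀ (word_values : List Int) (voltage_list : List Int), Dom_select_voltage word_values voltage_list → Pre_select_voltage word_values voltage_list → Spec_select_voltage word_values voltage_list (select_voltage word_values voltage_list)

-- ===== LEMMAS AND PROOFS =====

-- the pair fold of pvStepB splits into two independent folds
theorem foldl_stepB_fst (w x : Int) : ∀ (l : List Nat) (v : List Int) (u : List Nat),
    (l.foldl (pvStepB w x) (v, u)).1
      = l.foldl (fun v b => if pvBitSet w b then v.set b x else v) v := by
  intro l
  induction l with
  | nil => intro v u; rfl
  | cons a rest ih =>
    intro v u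
    by_cases h : pvBitSet w a = true <;> simp [pvStepB, h, ih]

theorem foldl_stepB_snd (w x : Int) : ∀ (l : List Nat) (v : List Int) (u : List Nat),
    (l.foldl (pvStepB w x) (v, u)).2
      = l.foldl (fun u b => if pvBitSet w b then u.erase b else u) u := by
  intro l
  induction l with
  | nil => intro v u; rfl
  | cons a rest ih =>
    intro v u
    by_cases h : pvBitSet w a = true <;> simp [pvStepB, h, ih]

theorem setFold_length (p : Nat → Bool) (x : Int) : ∀ (l : List Nat) (v : List Int),
    (l.foldl (fun v b => if p b then v.set b x else v) v).length = v.length := by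
  intro l
  induction l with
  | nil => intro v; rfl
  | cons a rest ih =>
    intro v
    by_cases h : p a = true <;> simp [h, ih]

theorem setFold_get (p : Nat → Bool) (x : Int) : ∀ (l : List Nat) (v : List Int) (bit : Nat),
    bit < v.length →
    (l.foldl (fun v b => if p b then v.set b x else v) v)[bit]?
      = if bit ∈ l ∧ p bit = true then some x else v[bit]? := by
  intro l
  induction l with
  | nil => intro v bit h; simp
  | cons a rest ih =>
    intro v bit h
    have hlen : bit < (if p a then v.set a x else v).length := by
      by_cases hpa : p a = true <;> simp [hpa, h]
    rw [List.foldl_cons, ih _ bit hlen]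
    have hv' : (if p a then v.set a x else v)[bit]?
        = if bit = a ∧ p a = true then some x else v[bit]? := by
      by_cases hpa : p a = true
      · by_cases hba : bit = a
        · subst hba; simp [hpa, h]
        · simp [hpa, hba, Ne.symm hba]
      · simp [hpa]
    rw [hv']
    by_cases hba : bit = a
    · subst hba
      by_cases hpb : p bit = true <;> by_cases hm : bit ∈ rest <;> simp [hpb, hm]
    · by_cases hpb : p bit = true <;> by_cases hm : bit ∈ rest <;> simp [hpb, hm, hba]

theorem eraseFold_nodup (p : Nat → Bool) : ∀ (l : List Nat) (u : List Nat), u.Nodup →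
    (l.foldl (fun u b => if p b then u.erase b else u) u).Nodup := by
  intro l
  induction l with
  | nil => intro u hu; exact hu
  | cons a rest ih =>
    intro u hu
    rw [List.foldl_cons]
    apply ih
    by_cases hpa : p a = true <;> simp [hpa, hu, hu.erase]

theorem eraseFold_mem (p : Nat → Bool) : ∀ (l : List Nat) (u : List Nat), u.Nodup → ∀ b : Nat,
    (b ∈ l.foldl (fun u b => if p b then u.erase b else u) u
      ↔ b ∈ u ∧ ¬(b ∈ l ∧ p b = true)) := by
  intro l
  induction l with
  | nil => intro u hu b; simp
  | cons a rest ih =>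
    intro u hu b
    have hu' : (if p a then u.erase a else u).Nodup := by
      by_cases hpa : p a = true <;> simp [hpa, hu, hu.erase]
    rw [List.foldl_cons, ih _ hu' b]
    have hmem : b ∈ (if p a then u.erase a else u) ↔ b ∈ u ∧ (p a = true → b ≠ a) := by
      by_cases hpa : p a = true <;> simp [hpa, hu.mem_erase_iff, and_comm]
    rw [hmem]
    simp only [List.mem_cons]
    by_cases hba : b = a
    · subst hba; tauto
    · tauto

theorem loopB_length (vl : List Int) : ∀ (ws : List Int) (i : Nat) (v : List Int) (u : List Nat),
    (pvLoopB vl ws i v u).length = v.length := by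
  intro ws
  induction ws with
  | nil => intro i v u; rfl
  | cons w rest ih =>
    intro i v u
    cases he : u.isEmpty
    · simp only [pvLoopB, he, Bool.false_eq_true, if_false]
      rw [ih, foldl_stepB_fst, setFold_length]
    · simp [pvLoopB, he]

theorem loopB_get (vl : List Int) : ∀ (ws : List Int) (i : Nat) (v : List Int) (u : List Nat),
    u.Nodup → ∀ (bit : Nat), bit < v.length →
    (pvLoopB vl ws i v u)[bit]?
      = if bit ∈ u then
          (match pvFirstSetA bit ws i with
           | some j => some ((PySem.List.pyGet? vl (j : Int)).getD 0)
           | none => v[bit]?)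
        else v[bit]? := by
  intro ws
  induction ws with
  | nil =>
    intro i v u hu bit h
    by_cases hm : bit ∈ u <;> simp [pvLoopB, pvFirstSetA, hm]
  | cons w rest ih =>
    intro i v u hu bit h
    cases he : u.isEmpty
    · set x := (PySem.List.pyGet? vl (i : Int)).getD 0 with hx
      have hfst := foldl_stepB_fst w x u v u
      have hsnd := foldl_stepB_snd w x u v u
      have hvlen : (u.foldl (pvStepB w x) (v, u)).1.length = v.length := by
        rw [hfst, setFold_length]
      have hune : (u.foldl (pvStepB w x) (v, u)).2.Nodup := by
        rw [hsnd]; exact eraseFold_nodup _ u u hu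
      have hstep : pvLoopB vl (w :: rest) i v u
          = pvLoopB vl rest (i + 1) (u.foldl (pvStepB w x) (v, u)).1
              (u.foldl (pvStepB w x) (v, u)).2 := by
        simp [pvLoopB, he, hx]
      have hbit' : bit < (u.foldl (pvStepB w x) (v, u)).1.length := by
        rw [hvlen]; exact h
      have hIH := ih (i + 1) _ _ hune bit hbit'
      have hmem2 : ∀ b : Nat, b ∈ (u.foldl (pvStepB w x) (v, u)).2
          ↔ b ∈ u ∧ ¬(b ∈ u ∧ pvBitSet w b = true) := by
        intro b; rw [hsnd]; exact eraseFold_mem _ u u hu b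
      have hget1 : (u.foldl (pvStepB w x) (v, u)).1[bit]?
          = if bit ∈ u ∧ pvBitSet w bit = true then some x else v[bit]? := by
        rw [hfst]; exact setFold_get (fun b => pvBitSet w b) x u v bit h
      rw [hstep, hIH]
      by_cases hmu : bit ∈ u
      · by_cases hbw : pvBitSet w bit = true
        · have hnot2 : bit ∉ (u.foldl (pvStepB w x) (v, u)).2 := by
            rw [hmem2]; rintro ⟨_, hn⟩; exact hn ⟨hmu, hbw⟩
          simp only [hnot2, if_false, hget1, hmu, hbw, and_self, if_true]
          simp [pvFirstSetA, hbw, hx, PySem.List.pyGet?_natCast]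
        · have hin2 : bit ∈ (u.foldl (pvStepB w x) (v, u)).2 := by
            rw [hmem2]; exact ⟨hmu, fun hc => hbw hc.2⟩
          have hvv : (u.foldl (pvStepB w x) (v, u)).1[bit]? = v[bit]? := by
            rw [hget1]; simp [hbw]
          simp only [hin2, if_true, hmu, hvv]
          simp [pvFirstSetA, hbw]
      · have hnot2 : bit ∉ (u.foldl (pvStepB w x) (v, u)).2 := by
          rw [hmem2]; rintro ⟨hb, _⟩; exact hmu hb
        have hvv : (u.foldl (pvStepB w x) (v, u)).1[bit]? = v[bit]? := by
          rw [hget1]; simp [hmu]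
        simp [hnot2, hmu, hvv]
    · have : u = [] := List.isEmpty_iff.mp he
      subst this
      simp [pvLoopB]

theorem afold_length (wv vl : List Int) : ∀ (l : List Nat) (v : List Int),
    (l.foldl (fun voltages bit =>
        match pvFirstSetA bit wv 0 with
        | some i => voltages.set bit ((PySem.List.pyGet? vl (i : Int)).getD 0)
        | none => voltages) v).length = v.length := by
  intro l
  induction l with
  | nil => intro v; rfl
  | cons a rest ih =>
    intro v
    rw [List.foldl_cons, ih]
    cases pvFirstSetA a wv 0 <;> simp

theorem afold_get (wv vl : List Int) : ∀ (l : List Nat) (v : List Int) (bit : Nat),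
    bit < v.length →
    (l.foldl (fun voltages bit =>
        match pvFirstSetA bit wv 0 with
        | some i => voltages.set bit ((PySem.List.pyGet? vl (i : Int)).getD 0)
        | none => voltages) v)[bit]?
      = if bit ∈ l then
          (match pvFirstSetA bit wv 0 with
           | some i => some ((PySem.List.pyGet? vl (i : Int)).getD 0)
           | none => v[bit]?)
        else v[bit]? := by
  intro l
  induction l with
  | nil => intro v bit h; simp
  | cons a rest ih =>
    intro v bit h
    have hglen : ∀ (v : List Int) (b : Nat),
        ((match pvFirstSetA b wv 0 with
          | some i => v.set b ((PySem.List.pyGet? vl (i : Int)).getD 0)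
          | none => v) : List Int).length = v.length := by
      intro v b; cases pvFirstSetA b wv 0 <;> simp
    have hbit' : bit < ((match pvFirstSetA a wv 0 with
          | some i => v.set a ((PySem.List.pyGet? vl (i : Int)).getD 0)
          | none => v) : List Int).length := by
      rw [hglen]; exact h
    rw [List.foldl_cons, ih _ bit hbit']
    by_cases hba : bit = a
    · subst hba
      by_cases hm : bit ∈ rest
      · simp only [hm, if_true, List.mem_cons, true_or]
        cases hf : pvFirstSetA bit wv 0 <;> simp
      · simp only [hm, if_false, List.mem_cons, true_or, if_true]
        cases hf : pvFirstSetA bit wv 0 with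
        | some i => simp [h]
        | none => simp
    · have hgv : ((match pvFirstSetA a wv 0 with
          | some i => v.set a ((PySem.List.pyGet? vl (i : Int)).getD 0)
          | none => v) : List Int)[bit]? = v[bit]? := by
        cases pvFirstSetA a wv 0 with
        | some i => simp [Ne.symm hba]
        | none => rfl
      rw [hgv]
      by_cases hm : bit ∈ rest <;> simp [hm, hba]

-- ===== VERDICT (by name: the statement is the Claim_ definition above) =====
theorem select_voltage_spec : Claim_equal_select_voltage := by
  intro wv vl _ _
  unfold Spec_select_voltage select_voltage select_voltage_alt
  set d := (PySem.List.pyGet? vl (-1)).getD 0 with hd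
  apply List.ext_getElem?
  intro bit
  by_cases hb16 : bit < 16
  · have hbl : bit < (List.replicate 16 d).length := by simpa using hb16
    have hA := afold_get wv vl (List.range 16) (List.replicate 16 d) bit hbl
    have hB := loopB_get vl wv 0 (List.replicate 16 d) (List.range 16)
      List.nodup_range bit hbl
    have hm : bit ∈ List.range 16 := List.mem_range.mpr hb16
    simp only [hm, if_true] at hA hB
    rw [hA, hB]
  · rw [List.getElem?_eq_none, List.getElem?_eq_none]
    · rw [loopB_length]; simpa using Nat.le_of_not_lt hb16
    · rw [afold_length wv vl]; simpa using Nat.le_of_not_lt hb16
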